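-- pv_equiv track=rewrite | github.com/tenchik06/dynamic-programming | solution_dp_recursive.py | f
-- ===== SOURCE A (Python) =====
-- INF = 10**9
--
-- def f(i, j, pref):
--     if i == 0 and j == 0:
--         return 0
--     if j == 0:
--         return INF
--     best = INF
--
--     for k in range(j-1, i):
--         last = pref[i] - pref[k]
--         val = max(f(k, j-1, pref), last)
--         best = min(best, val)
--     return best
-- ===== SOURCE B (Python) =====
-- INF = 10**9
--
-- def _best(dp, pref, jj, m):
--     best = INF
--     for k in range(jj - 1, m):
--         best = min(best, max(dp[k], pref[m] - pref[k]))
--     return best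
--
-- def f(i, j, pref):
--     if i == 0 and j == 0:
--         return 0
--     if j == 0:
--         return INF
--     if i < j:
--         return INF
--     dp = [0] + [INF] * i
--     for jj in range(1, j + 1):
--         dp = [INF if m < jj else _best(dp, pref, jj, m) for m in range(i + 1)]
--     return dp[i]
-- ===== Notes on version B (the rewrite author's own statement) =====
-- stated objective: alternative
-- what changed: replaces A's top-down recursion over (i,j) states (recomputed exponentially many times) with a bottom-up DP table dp[m] = best split of pref[0..m] into jj parts, rebuilt for jj = 1..j; intended as faster but measured only 1.68x at the largest size both finished
import Mathlib
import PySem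

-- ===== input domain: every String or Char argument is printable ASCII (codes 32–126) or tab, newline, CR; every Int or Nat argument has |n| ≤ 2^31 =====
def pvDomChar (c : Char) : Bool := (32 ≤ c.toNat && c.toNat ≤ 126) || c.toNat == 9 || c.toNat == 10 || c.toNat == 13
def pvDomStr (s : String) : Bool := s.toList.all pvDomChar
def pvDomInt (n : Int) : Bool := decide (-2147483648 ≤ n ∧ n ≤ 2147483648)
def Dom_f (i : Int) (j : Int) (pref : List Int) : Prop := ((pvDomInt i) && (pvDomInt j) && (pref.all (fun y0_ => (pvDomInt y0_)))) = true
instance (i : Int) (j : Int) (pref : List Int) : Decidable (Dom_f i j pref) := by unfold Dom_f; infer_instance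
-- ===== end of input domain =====

-- B replaces A's top-down recursion over (i,j) states by a bottom-up DP table over (parts, prefix) states; same return value on Pre_f.

def INF : Int := 10 ^ 9

-- ===== PORT A =====
def f (i : Int) (j : Int) (pref : List Int) : Int :=
  if i = 0 ∧ j = 0 then 0
  else if _h2 : j = 0 then INF
  else if _h3 : j < 0 then INF
    -- guard for termination only: Python diverges here whenever the loop is nonempty
    -- (excluded by Pre_f), and with an empty loop it returns INF, as this branch does
  else
    (PySem.List.pyRange (j - 1) i 1).foldl
      (fun best k =>
        let last := (PySem.List.pyGet? pref i).getD 0 - (PySem.List.pyGet? pref k).getD 0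
        let val := max (f k (j - 1) pref) last
        min best val) INF
termination_by j.toNat
decreasing_by omega

-- ===== PORT B =====
def bestB (dp : List Int) (pref : List Int) (jj m : Nat) : Int :=
  (List.range' (jj - 1) (m - (jj - 1))).foldl
    (fun best k => min best (max (dp.getD k 0) (pref.getD m 0 - pref.getD k 0))) INF

def f_alt (i : Int) (j : Int) (pref : List Int) : Int :=
  if i = 0 ∧ j = 0 then 0
  else if j = 0 then INF
  else if i < j then INF
  else
    let n := i.toNat
    let dp := (List.range' 1 j.toNat).foldl
      (fun dp jj => (List.range (n + 1)).map
        (fun m => if m < jj then INF else bestB dp pref jj m))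
      (0 :: List.replicate n INF)
    dp.getD n 0

-- ===== PRECONDITION & SPEC =====
-- Pre_f excludes exactly the inputs where the Python A does not return: IndexError when the
-- loop runs with i ≥ len(pref) (needs 1 ≤ j ≤ i), and unbounded recursion when j < 0 ≤ i - j.
def Pre_f (i : Int) (j : Int) (pref : List Int) : Prop :=
  (j < 0 ∧ i < j) ∨ (0 ≤ j ∧ (i < j ∨ j = 0 ∨ i < pref.length))
instance (i : Int) (j : Int) (pref : List Int) : Decidable (Pre_f i j pref) := by
  unfold Pre_f; infer_instance

def pvWitness_f : Int × Int × List Int := (3, 2, [0, 2, 3, 6])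

def Spec_f (i : Int) (j : Int) (pref : List Int) (out : Int) : Prop := out = f_alt i j pref
instance (i : Int) (j : Int) (pref : List Int) (out : Int) : Decidable (Spec_f i j pref out) := by
  unfold Spec_f; infer_instance

-- ===== CLAIM (what is proved, stated in full; the proofs are below) =====
def Claim_equal_f : Prop := ∀ (i : Int) (j : Int) (pref : List Int), Dom_f i j pref → Pre_f i j pref → Spec_f i j pref (f i j pref)

-- ===== LEMMAS AND PROOFS =====

-- common mathematical form of the recurrence, over Nat indices
def G (pref : List Int) : Nat → Nat → Int
  | 0, 0 => 0
  | _ + 1, 0 => INF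
  | m, jj + 1 =>
    (List.range' jj (m - jj)).foldl
      (fun best k => min best (max (G pref k jj) (pref.getD m 0 - pref.getD k 0))) INF
termination_by m jj => jj

theorem fA_eq_G (pref : List Int) (jj m : Nat) :
    f (m : Int) (jj : Int) pref = G pref m jj := by
  induction jj generalizing m with
  | zero =>
    cases m with
    | zero => simp [f, G]
    | succ m' =>
      rw [f, if_neg (by rintro ⟨h, _⟩; omega), dif_pos (show ((0:Nat):Int) = 0 by norm_num)]
      simp [G]
  | succ jj ih =>
    rw [f, G]
    have h1 : ¬ ((m : Int) = 0 ∧ ((jj : Int) + 1) = 0) := by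
      rintro ⟨_, h⟩; omega
    have hcast : ((jj : Int) + 1 : Int) = ((jj + 1 : Nat) : Int) := by push_cast; ring
    simp only [hcast] at *
    rw [if_neg (by push_cast at h1 ⊢; omega), dif_neg (by omega), dif_neg (by omega)]
    have hr : ((jj + 1 : Nat) : Int) - 1 = (jj : Int) := by push_cast; ring
    rw [hr, PySem.List.pyRange_one, List.range'_eq_map_range, List.foldl_map, List.foldl_map]
    have hn : ((m : Int) - (jj : Int)).toNat = m - jj := by omega
    rw [hn]
    apply PySem.List.foldl_congr_mem
    intro acc t _
    have h2 : ((jj : Int) + (t : Int)) = ((jj + t : Nat) : Int) := by push_cast; ring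
    rw [h2, ih (jj + t)]
    simp only [PySem.List.pyGet?_natCast, List.getD_eq_getElem?_getD]

theorem dp_inv (pref : List Int) (n : Nat) (t : Nat) (m : Nat) (hm : m ≤ n) :
    ((List.range' 1 t).foldl
      (fun dp jj => (List.range (n + 1)).map
        (fun m => if m < jj then INF else bestB dp pref jj m))
      (0 :: List.replicate n INF)).getD m 0 = G pref m t := by
  induction t generalizing m with
  | zero =>
    cases m with
    | zero => simp [G]
    | succ m' =>
      simp only [List.range'_zero, List.foldl_nil, List.getD, List.getElem?_cons_succ]
      rw [List.getElem?_replicate]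
      simp only [show m' < n from by omega, if_pos]
      simp [G]
  | succ t ih =>
    rw [List.range'_concat, List.foldl_append, List.foldl_cons, List.foldl_nil]
    rw [List.getD_eq_getElem?_getD, List.getElem?_map, List.getElem?_range (by omega)]
    simp only [Option.map_some, Option.getD_some, one_mul]
    by_cases hlt : m < 1 + t
    · rw [if_pos hlt, G]
      have : m - t = 0 := by omega
      rw [this]
      simp
    · rw [if_neg hlt]
      rw [bestB, G]
      have : 1 + t - 1 = t := by omega
      rw [this]
      apply PySem.List.foldl_congr_mem
      intro acc k hk
      rw [List.mem_range'_1] at hk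
      rw [ih k (by omega)]

theorem fA_eq_falt_main (i j : Int) (pref : List Int) (hj : 1 ≤ j) (hij : j ≤ i) :
    f i j pref = f_alt i j pref := by
  rw [f_alt, if_neg (by rintro ⟨_, h⟩; omega), if_neg (by omega), if_neg (by omega)]
  have hi : i = ((i.toNat : Nat) : Int) := by omega
  have hjn : j = ((j.toNat : Nat) : Int) := by omega
  rw [hi, hjn, fA_eq_G]
  exact (dp_inv pref i.toNat j.toNat i.toNat le_rfl).symm

-- ===== VERDICT (by name: the statement is the Claim_ definition above) =====
theorem f_spec : Claim_equal_f := by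
  intro i j pref _ hpre
  unfold Spec_f
  rcases hpre with ⟨hj, hij⟩ | ⟨hj, hrest⟩
  · rw [f, f_alt]
    rw [if_neg (by rintro ⟨_, h⟩; omega), if_neg (by rintro ⟨_, h⟩; omega)]
    rw [dif_neg (by omega), dif_pos hj, if_neg (by omega), if_pos hij]
  · by_cases hj0 : j = 0
    · subst hj0
      rw [f, f_alt]
      by_cases hi0 : i = 0
      · rw [if_pos ⟨hi0, rfl⟩, if_pos ⟨hi0, rfl⟩]
      · rw [if_neg (by rintro ⟨h, _⟩; exact hi0 h), if_neg (by rintro ⟨h, _⟩; exact hi0 h)]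
        rw [dif_pos rfl, if_pos rfl]
    · have hj1 : 1 ≤ j := by omega
      by_cases hlt : i < j
      · rw [f, f_alt]
        rw [if_neg (by rintro ⟨_, h⟩; omega), if_neg (by rintro ⟨_, h⟩; omega)]
        rw [dif_neg hj0, dif_neg (by omega), if_neg hj0, if_pos hlt]
        rw [PySem.List.pyRange_one]
        have : (i - (j - 1)).toNat = 0 := by omega
        rw [this]
        simp
      · exact fA_eq_falt_main i j pref hj1 (by omega)
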